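-- pv_equiv track=rewrite | github.com/meow-wwww/MSBD5003-Project | parallel/build_boxes.py | point_list_to_bounding_box
-- ===== SOURCE A (Python) =====
-- def point_list_to_bounding_box(point_list_list, expand=0):
--     area_list = []
--     for area_id, point_list in enumerate(point_list_list):
--         x_list = [p[0] for p in point_list]
--         y_list = [p[1] for p in point_list]
--         assert len(x_list) == len(y_list)
--         assert len(x_list) == len(point_list)
--         area_list.append([area_id, min(x_list)-expand, max(x_list)+expand, min(y_list)-expand, max(y_list)+expand])
--     return area_list
-- ===== SOURCE B (Python) =====
-- def point_list_to_bounding_box(point_list_list, expand=0):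
--     # Single pass per point list: running min/max seeded from the first point
--     # (so an empty point list raises, like A's min([])); no intermediate
--     # coordinate lists, no min/max library calls.
--     area_list = []
--     area_id = 0
--     for point_list in point_list_list:
--         x0, y0 = point_list[0]
--         mnx = mxx = x0
--         mny = mxy = y0
--         for x, y in point_list[1:]:
--             if x < mnx:
--                 mnx = x
--             if x > mxx:
--                 mxx = x
--             if y < mny:
--                 mny = y
--             if y > mxy:
--                 mxy = y
--         area_list.append([area_id, mnx - expand, mxx + expand, mny - expand, mxy + expand])
--         area_id += 1
--     return area_list
-- ===== Notes on version B (the rewrite author's own statement) =====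
-- stated objective: simpler
-- what changed: One single pass per point list maintaining running min_x/max_x/min_y/max_y seeded from the first point, instead of building two coordinate lists and calling min/max four times (plus asserts).
-- outside the precondition, e.g. on point_list_to_bounding_box([[]], 0): A raises ValueError, B raises IndexError
import Mathlib
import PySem

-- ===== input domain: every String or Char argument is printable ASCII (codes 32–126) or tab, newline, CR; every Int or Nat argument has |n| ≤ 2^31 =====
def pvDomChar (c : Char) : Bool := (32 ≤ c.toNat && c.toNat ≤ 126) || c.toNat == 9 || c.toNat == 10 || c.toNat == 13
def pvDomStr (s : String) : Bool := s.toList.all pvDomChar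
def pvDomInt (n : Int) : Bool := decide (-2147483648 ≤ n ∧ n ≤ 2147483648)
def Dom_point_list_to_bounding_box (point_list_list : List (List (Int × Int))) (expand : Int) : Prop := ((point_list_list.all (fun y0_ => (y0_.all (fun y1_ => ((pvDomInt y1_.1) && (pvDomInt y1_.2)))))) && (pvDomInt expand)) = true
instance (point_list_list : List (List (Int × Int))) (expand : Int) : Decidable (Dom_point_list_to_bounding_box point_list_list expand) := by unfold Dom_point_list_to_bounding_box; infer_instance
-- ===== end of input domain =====

-- B replaces A's two coordinate-list comprehensions and four min/max calls by one
-- single pass per point list with running min_x/max_x/min_y/max_y seeded from the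
-- first point (objective: simpler).

-- ===== PORT A =====
def point_list_to_bounding_box (point_list_list : List (List (Int × Int))) (expand : Int) : List (List Int) :=
  (PySem.List.enumerate point_list_list 0).foldl
    (fun area_list ap =>
      let point_list := ap.2
      let x_list := point_list.map (·.1)
      let y_list := point_list.map (·.2)
      -- min([]) raises ValueError in Python: min?/max? are none there; excluded by Pre_
      area_list ++ [[ap.1,
        (PySem.List.min? x_list (fun v => v)).getD 0 - expand,
        (PySem.List.max? x_list (fun v => v)).getD 0 + expand,
        (PySem.List.min? y_list (fun v => v)).getD 0 - expand,
        (PySem.List.max? y_list (fun v => v)).getD 0 + expand]])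
    []

-- ===== PORT B =====
-- the inner loop of B: running min/max over the remaining points
def pvBBoxLoop (rest : List (Int × Int)) (mnx mxx mny mxy : Int) : Int × Int × Int × Int :=
  match rest with
  | [] => (mnx, mxx, mny, mxy)
  | (x, y) :: t =>
      pvBBoxLoop t (if x < mnx then x else mnx) (if x > mxx then x else mxx)
        (if y < mny then y else mny) (if y > mxy then y else mxy)

-- the outer loop of B, carrying area_id and the output accumulator
def pvBBoxGo (pll : List (List (Int × Int))) (area_id : Int) (out : List (List Int)) (expand : Int) : List (List Int) :=
  match pll with
  | [] => out
  | pl :: rest =>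
      match pl with
      | [] => out  -- Python B raises IndexError here (point_list[0]); excluded by Pre_
      | (x0, y0) :: t =>
          match pvBBoxLoop t x0 x0 y0 y0 with
          | (mnx, mxx, mny, mxy) =>
              pvBBoxGo rest (area_id + 1)
                (out ++ [[area_id, mnx - expand, mxx + expand, mny - expand, mxy + expand]]) expand

def point_list_to_bounding_box_alt (point_list_list : List (List (Int × Int))) (expand : Int) : List (List Int) :=
  pvBBoxGo point_list_list 0 [] expand

-- ===== PRECONDITION & SPEC =====
-- Pre_ excludes inputs containing an empty point list: there A raises ValueError (min of
-- an empty sequence) and B raises IndexError, so neither returns a value.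
def Pre_point_list_to_bounding_box (point_list_list : List (List (Int × Int))) (expand : Int) : Prop :=
  ∀ pl ∈ point_list_list, pl ≠ []
instance (point_list_list : List (List (Int × Int))) (expand : Int) : Decidable (Pre_point_list_to_bounding_box point_list_list expand) := by unfold Pre_point_list_to_bounding_box; infer_instance

def pvWitness_point_list_to_bounding_box : (List (List (Int × Int))) × Int :=
  ([[(0, 1), (3, -2)], [(5, 5)]], 2)

def Spec_point_list_to_bounding_box (point_list_list : List (List (Int × Int))) (expand : Int) (out : List (List Int)) : Prop := out = point_list_to_bounding_box_alt point_list_list expand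
instance (point_list_list : List (List (Int × Int))) (expand : Int) (out : List (List Int)) : Decidable (Spec_point_list_to_bounding_box point_list_list expand out) := by unfold Spec_point_list_to_bounding_box; infer_instance

-- ===== CLAIM (what is proved, stated in full; the proofs are below) =====
def Claim_equal_point_list_to_bounding_box : Prop := ∀ (point_list_list : List (List (Int × Int))) (expand : Int), Dom_point_list_to_bounding_box point_list_list expand → Pre_point_list_to_bounding_box point_list_list expand → Spec_point_list_to_bounding_box point_list_list expand (point_list_to_bounding_box point_list_list expand)

-- ===== LEMMAS AND PROOFS =====

theorem pvIf_lt_eq_min (a b : Int) : (if b < a then b else a) = min a b := by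
  rw [min_def]; split_ifs <;> omega

theorem pvIf_gt_eq_max (a b : Int) : (if b > a then b else a) = max a b := by
  rw [max_def]; split_ifs <;> omega

theorem pvBBoxLoop_eq (t : List (Int × Int)) : ∀ (mnx mxx mny mxy : Int),
    pvBBoxLoop t mnx mxx mny mxy =
      ((t.map (·.1)).foldl min mnx, (t.map (·.1)).foldl max mxx,
       (t.map (·.2)).foldl min mny, (t.map (·.2)).foldl max mxy) := by
  induction t with
  | nil => intro mnx mxx mny mxy; rfl
  | cons p t ih =>
      intro mnx mxx mny mxy
      obtain ⟨x, y⟩ := p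
      simp only [pvBBoxLoop, List.map_cons, List.foldl_cons,
        pvIf_lt_eq_min, pvIf_gt_eq_max, ih]

theorem pvGo_eq (pll : List (List (Int × Int))) (expand : Int)
    (h : ∀ pl ∈ pll, pl ≠ []) : ∀ (s : Int) (acc : List (List Int)),
    (PySem.List.enumerate pll s).foldl
      (fun area_list ap =>
        let point_list := ap.2
        let x_list := point_list.map (·.1)
        let y_list := point_list.map (·.2)
        area_list ++ [[ap.1,
          (PySem.List.min? x_list (fun v => v)).getD 0 - expand,
          (PySem.List.max? x_list (fun v => v)).getD 0 + expand,
          (PySem.List.min? y_list (fun v => v)).getD 0 - expand,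
          (PySem.List.max? y_list (fun v => v)).getD 0 + expand]]) acc
    = pvBBoxGo pll s acc expand := by
  induction pll with
  | nil => intro s acc; simp [PySem.List.enumerate_nil, pvBBoxGo]
  | cons pl rest ih =>
      intro s acc
      have hpl : pl ≠ [] := h pl (List.mem_cons_self ..)
      obtain ⟨⟨x0, y0⟩, t, rfl⟩ : ∃ p t, pl = p :: t := by
        cases pl with
        | nil => exact absurd rfl hpl
        | cons p t => exact ⟨p, t, rfl⟩
      rw [PySem.List.enumerate_cons, List.foldl_cons,
        ih (fun q hq => h q (List.mem_cons_of_mem _ hq))]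
      simp only [pvBBoxGo, pvBBoxLoop_eq, List.map_cons,
        PySem.List.min?_id_cons, PySem.List.max?_id_cons, Option.getD_some]

-- ===== VERDICT (by name: the statement is the Claim_ definition above) =====
theorem point_list_to_bounding_box_spec : Claim_equal_point_list_to_bounding_box := by
  intro pll expand _ hpre
  unfold Spec_point_list_to_bounding_box point_list_to_bounding_box point_list_to_bounding_box_alt
  exact pvGo_eq pll expand hpre 0 []
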